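-- pv_equiv track=rewrite | github.com/MrBrantCode/unitest_baseline | mut_generate/mist_train_taco/taco_8866/solution.py | min_value_after_removal
-- ===== SOURCE A (Python) =====
-- def min_value_after_removal(S: str, K: int) -> int:
--     # Dictionary to store frequency of each character
--     char_count = {}
--
--     # Calculate the frequency of each character in the string
--     for char in S:
--         char_count[char] = char_count.get(char, 0) + 1
--
--     # List of frequencies
--     frequencies = list(char_count.values())
--
--     # Perform the removal of 'K' characters
--     for _ in range(K):
--         # Find the index of the maximum frequency
--         max_freq_index = frequencies.index(max(frequencies))
--
--         # If the maximum frequency is 0, return 0 (no more characters to remove)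
--         if frequencies[max_freq_index] == 0:
--             return 0
--
--         # Decrease the maximum frequency by 1
--         frequencies[max_freq_index] -= 1
--
--     # Calculate the sum of squares of the remaining frequencies
--     min_value = sum(freq ** 2 for freq in frequencies)
--
--     return min_value
-- ===== SOURCE B (Python) =====
-- def min_value_after_removal(S: str, K: int) -> int:
--     # character frequencies (insertion order, same multiset as A's)
--     counts = {}
--     for ch in S:
--         counts[ch] = counts.get(ch, 0) + 1
--     freqs = list(counts.values())
--     total = sum(freqs)
--     if total <= K:
--         # K removals exhaust the string: every frequency reaches 0
--         return 0
--     if K <= 0: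
--         return sum(f * f for f in freqs)
--     # Binary-search the least level t >= 0 whose excess sum(f - t for f > t) fits in K.
--     lo, hi = 0, max(freqs)
--     while lo < hi:
--         mid = (lo + hi) // 2
--         if sum(f - mid for f in freqs if f > mid) <= K:
--             hi = mid
--         else:
--             lo = mid + 1
--     t = lo
--     r = K - sum(f - t for f in freqs if f > t)   # leftover removals at level t
--     m = sum(1 for f in freqs if f >= t)          # frequencies levelled to t
--     return (sum(f * f for f in freqs if f < t)
--             + (m - r) * t * t + r * (t - 1) * (t - 1))
-- ===== Notes on version B (the rewrite author's own statement) =====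
-- stated objective: faster
-- what changed: Replaces the K-iteration simulation (each step scanning for the max and decrementing it) by a direct computation of the final frequency distribution: binary-search the levelling threshold t, then evaluate the sum of squares in closed form.
import Mathlib
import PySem

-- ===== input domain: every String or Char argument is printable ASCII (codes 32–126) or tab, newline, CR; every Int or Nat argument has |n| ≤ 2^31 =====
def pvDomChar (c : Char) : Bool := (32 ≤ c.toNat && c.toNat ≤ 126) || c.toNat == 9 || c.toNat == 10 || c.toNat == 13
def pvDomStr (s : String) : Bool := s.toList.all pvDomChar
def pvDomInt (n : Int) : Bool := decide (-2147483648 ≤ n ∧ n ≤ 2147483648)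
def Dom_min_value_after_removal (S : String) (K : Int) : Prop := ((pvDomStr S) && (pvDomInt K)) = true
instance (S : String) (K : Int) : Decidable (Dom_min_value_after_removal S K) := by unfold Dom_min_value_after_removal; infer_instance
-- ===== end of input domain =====

-- B replaces A's K-step simulation (scan for the max, decrement it, repeat) by a direct
-- computation of the final levelled frequency distribution via binary search on the threshold.

-- ===== PORT A =====

-- char_count built by the dict loop; frequencies = list(char_count.values())
def pvFreqsA (S : String) : List Int :=
  (S.toList.foldl (fun d c => d.insert c (d.getD c 0 + 1)) PySem.Dict.empty).values

-- sum(freq ** 2 for freq in frequencies)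
def pvSumsqA (freqs : List Int) : Int := (freqs.map (fun f => f ^ 2)).sum

-- the `for _ in range(K)` loop (one constructor step per iteration)
def pvLoopA : Nat → List Int → Int
  | 0, freqs => pvSumsqA freqs
  | n + 1, freqs =>
    match PySem.List.max? freqs (fun y => y) with
    | none => 0       -- max([]) raises ValueError here: these inputs are excluded by Pre_
    | some mx =>
      match PySem.List.index? freqs mx with
      | none => 0     -- unreachable: the maximum is a member of the list
      | some i =>
        let v := PySem.List.pyGetD freqs (i : Int) 0
        if v = 0 then 0
        else pvLoopA n (PySem.List.pySetD freqs (i : Int) (v - 1))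

def min_value_after_removal (S : String) (K : Int) : Int :=
  pvLoopA K.toNat (pvFreqsA S)

-- ===== PORT B =====

def pvFreqsB (S : String) : List Int :=
  (S.toList.foldl (fun d c => d.insert c (d.getD c 0 + 1)) PySem.Dict.empty).values

-- _excess(freqs, t) = sum(f - t for f in freqs if f > t)
def pvExcessB (freqs : List Int) (t : Int) : Int :=
  ((freqs.filter (fun f => t < f)).map (fun f => f - t)).sum

-- the `while lo < hi` binary-search loop
def pvBsearchB (freqs : List Int) (K : Int) (lo hi : Int) : Int :=
  if h : lo < hi then
    let mid := PySem.Int.floordiv (lo + hi) 2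
    if pvExcessB freqs mid ≤ K then pvBsearchB freqs K lo mid
    else pvBsearchB freqs K (mid + 1) hi
  else lo
termination_by (hi - lo).toNat
decreasing_by
  · have := PySem.Int.floordiv_two_mid_bounds (le_of_lt h)
    have hlt : PySem.Int.floordiv (lo + hi) 2 < hi := by
      rw [PySem.Int.floordiv_lt_iff_lt_mul (by omega)]; omega
    omega
  · have := PySem.Int.floordiv_two_mid_bounds (le_of_lt h)
    have hlt : PySem.Int.floordiv (lo + hi) 2 < hi := by
      rw [PySem.Int.floordiv_lt_iff_lt_mul (by omega)]; omega
    omega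

def min_value_after_removal_alt (S : String) (K : Int) : Int :=
  let freqs := pvFreqsB S
  let total := freqs.sum
  if total ≤ K then 0
  else if K ≤ 0 then (freqs.map (fun f => f * f)).sum
  else
    -- max(freqs): freqs is nonempty here (total > K ≥ 1), so the default is never used
    let t := pvBsearchB freqs K 0 ((PySem.List.max? freqs (fun y => y)).getD 0)
    let r := K - pvExcessB freqs t
    let m := ((freqs.filter (fun f => t ≤ f)).length : Int)
    ((freqs.filter (fun f => f < t)).map (fun f => f * f)).sum
      + (m - r) * t * t + r * (t - 1) * (t - 1)

-- ===== PRECONDITION & SPEC =====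
-- Pre_ excludes only S == "" with K >= 1, where A's max([]) raises ValueError.
def Pre_min_value_after_removal (S : String) (K : Int) : Prop := S = "" → K ≤ 0
instance (S : String) (K : Int) : Decidable (Pre_min_value_after_removal S K) := by
  unfold Pre_min_value_after_removal; infer_instance
def pvWitness_min_value_after_removal : String × Int := ("ab", 1)

def Spec_min_value_after_removal (S : String) (K : Int) (out : Int) : Prop :=
  out = min_value_after_removal_alt S K
instance (S : String) (K : Int) (out : Int) : Decidable (Spec_min_value_after_removal S K out) := by
  unfold Spec_min_value_after_removal; infer_instance

-- ===== CLAIM (what is proved, stated in full; the proofs are below) =====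
def Claim_equal_min_value_after_removal : Prop :=
  ∀ (S : String) (K : Int), Dom_min_value_after_removal S K →
    Pre_min_value_after_removal S K →
    Spec_min_value_after_removal S K (min_value_after_removal S K)

-- ===== LEMMAS AND PROOFS =====
-- The proof characterises the frequency multiset after k greedy max-decrements in closed
-- form (pvL), shows A's loop walks through pvL step by step (pvMain), and shows B's binary
-- search computes the levelling threshold pvT of that closed form.

-- sum of squares of a multiset
def pvMsq (M : Multiset ℤ) : ℤ := (M.map (fun f => f * f)).sum
-- excess above level t
def pvExc (M : Multiset ℤ) (t : ℤ) : ℤ := ((M.filter (fun f => t < f)).map (fun f => f - t)).sum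
-- number of elements at level >= t
def pvCntGe (M : Multiset ℤ) (t : ℤ) : ℤ := ((M.filter (fun f => t ≤ f)).card : ℤ)
-- least level t >= 0 whose excess fits in k
noncomputable def pvT (M : Multiset ℤ) (k : ℤ) : ℤ :=
  letI := Classical.propDecidable (∃ n : ℕ, pvExc M (n : ℤ) ≤ k)
  if h : ∃ n : ℕ, pvExc M (n : ℤ) ≤ k then ((Nat.find h : ℕ) : ℤ) else 0
-- the frequency multiset after k greedy max-decrements (for 0 ≤ k ≤ M.sum)
noncomputable def pvL (M : Multiset ℤ) (k : ℤ) : Multiset ℤ :=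
  M.filter (fun f => f < pvT M k)
    + Multiset.replicate (pvCntGe M (pvT M k) - (k - pvExc M (pvT M k))).toNat (pvT M k)
    + Multiset.replicate (k - pvExc M (pvT M k)).toNat (pvT M k - 1)

theorem pvExc_cons (a t : ℤ) (M : Multiset ℤ) :
    pvExc (a ::ₘ M) t = pvExc M t + (if t < a then a - t else 0) := by
  unfold pvExc
  rw [Multiset.filter_cons]
  split_ifs with h <;> simp [add_comm]

theorem pvCntGe_cons (a t : ℤ) (M : Multiset ℤ) :
    pvCntGe (a ::ₘ M) t = pvCntGe M t + (if t ≤ a then 1 else 0) := by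
  unfold pvCntGe
  rw [Multiset.filter_cons]
  split_ifs with h <;> simp [add_comm]

theorem pvExc_nonneg (M : Multiset ℤ) (t : ℤ) : 0 ≤ pvExc M t := by
  unfold pvExc
  apply Multiset.sum_nonneg
  intro x hx
  simp only [Multiset.mem_map, Multiset.mem_filter] at hx
  obtain ⟨f, ⟨_, hf⟩, rfl⟩ := hx
  omega

theorem pvExc_antitone (M : Multiset ℤ) {s t : ℤ} (h : s ≤ t) : pvExc M t ≤ pvExc M s := by
  induction M using Multiset.induction_on with
  | empty => simp [pvExc]
  | cons a M ih => rw [pvExc_cons, pvExc_cons]; split_ifs <;> omega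

theorem pvExc_pred (M : Multiset ℤ) (t : ℤ) : pvExc M (t - 1) = pvExc M t + pvCntGe M t := by
  induction M using Multiset.induction_on with
  | empty => simp [pvExc, pvCntGe]
  | cons a M ih => rw [pvExc_cons, pvExc_cons, pvCntGe_cons]; split_ifs <;> omega

theorem pvExc_zero (M : Multiset ℤ) (h0 : ∀ x ∈ M, 0 ≤ x) : pvExc M 0 = M.sum := by
  induction M using Multiset.induction_on with
  | empty => simp [pvExc]
  | cons a M ih =>
    rw [pvExc_cons, ih (fun x hx => h0 x (Multiset.mem_cons_of_mem hx)), Multiset.sum_cons]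
    have := h0 a (Multiset.mem_cons_self a M)
    split_ifs <;> omega

theorem pvExc_eq_zero_of_le (M : Multiset ℤ) {t : ℤ} (h : ∀ x ∈ M, x ≤ t) : pvExc M t = 0 := by
  induction M using Multiset.induction_on with
  | empty => simp [pvExc]
  | cons a M ih =>
    rw [pvExc_cons, ih (fun x hx => h x (Multiset.mem_cons_of_mem hx))]
    have := h a (Multiset.mem_cons_self a M)
    split_ifs <;> omega

theorem pvT_exists (M : Multiset ℤ) {k : ℤ} (h0 : ∀ x ∈ M, 0 ≤ x) (hk : 0 ≤ k) :
    ∃ n : ℕ, pvExc M (n : ℤ) ≤ k := by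
  refine ⟨M.sum.toNat, ?_⟩
  have hz : pvExc M ((M.sum.toNat : ℕ) : ℤ) = 0 := by
    apply pvExc_eq_zero_of_le
    intro x hx
    have hs := Multiset.single_le_sum h0 x hx
    omega
  omega

theorem pvT_nonneg (M : Multiset ℤ) (k : ℤ) : 0 ≤ pvT M k := by
  unfold pvT
  split <;> positivity

theorem pvT_le (M : Multiset ℤ) {k : ℤ} (h0 : ∀ x ∈ M, 0 ≤ x) (hk : 0 ≤ k) :
    pvExc M (pvT M k) ≤ k := by
  unfold pvT
  rw [dif_pos (pvT_exists M h0 hk)]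
  exact Nat.find_spec (pvT_exists M h0 hk)

theorem pvT_min (M : Multiset ℤ) {k j : ℤ} (h0 : ∀ x ∈ M, 0 ≤ x) (hk : 0 ≤ k)
    (hj : 0 ≤ j) (hjt : j < pvT M k) : k < pvExc M j := by
  unfold pvT at hjt
  rw [dif_pos (pvT_exists M h0 hk)] at hjt
  have hfind := Nat.find_min (pvT_exists M h0 hk) (m := j.toNat) (by omega)
  have hcast : ((j.toNat : ℕ) : ℤ) = j := by omega
  rw [hcast] at hfind
  omega

theorem pvT_unique (M : Multiset ℤ) {k u : ℤ} (h0 : ∀ x ∈ M, 0 ≤ x) (hk : 0 ≤ k)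
    (hu : 0 ≤ u) (hle : pvExc M u ≤ k) (hmin : u = 0 ∨ k < pvExc M (u - 1)) :
    u = pvT M k := by
  rcases lt_trichotomy u (pvT M k) with h | h | h
  · have := pvT_min M h0 hk hu h
    omega
  · exact h
  · exfalso
    rcases hmin with rfl | hmin
    · have := pvT_nonneg M k
      omega
    · have h1 : pvT M k ≤ u - 1 := by omega
      have h2 := pvExc_antitone M h1
      have h3 := pvT_le M h0 hk
      omega

theorem pvT_pos (M : Multiset ℤ) {k : ℤ} (h0 : ∀ x ∈ M, 0 ≤ x) (hk : 0 ≤ k)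
    (hks : k < M.sum) : 1 ≤ pvT M k := by
  by_contra h
  have h1 : pvT M k = 0 := by have := pvT_nonneg M k; omega
  have h2 := pvT_le M h0 hk
  rw [h1, pvExc_zero M h0] at h2
  omega

theorem pvR_bounds (M : Multiset ℤ) {k : ℤ} (h0 : ∀ x ∈ M, 0 ≤ x) (hk : 0 ≤ k)
    (hks : k < M.sum) :
    0 ≤ k - pvExc M (pvT M k) ∧ k - pvExc M (pvT M k) < pvCntGe M (pvT M k) := by
  have h1 := pvT_le M h0 hk
  have h2 := pvT_pos M h0 hk hks
  have h3 := pvT_min M h0 hk (j := pvT M k - 1) (by omega) (by omega)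
  have h4 := pvExc_pred M (pvT M k)
  omega

theorem pvFilter_split (M : Multiset ℤ) (t : ℤ) :
    M.filter (fun f => f < t) + M.filter (fun f => t ≤ f) = M := by
  have h : M.filter (fun f => t ≤ f) = M.filter (fun f => ¬ f < t) :=
    Multiset.filter_congr (by intro x _; constructor <;> (intro; omega))
  rw [h]
  exact Multiset.filter_add_not _ M

theorem pvFilter_lt_split (M : Multiset ℤ) (t : ℤ) :
    M.filter (fun f => f < t) = M.filter (fun f => f < t - 1) + M.filter (fun f => f = t - 1) := by
  induction M using Multiset.induction_on with
  | empty => simp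
  | cons a M ih =>
    rw [Multiset.filter_cons, Multiset.filter_cons, Multiset.filter_cons, ih]
    split_ifs <;> try omega
    all_goals simp [Multiset.cons_add, Multiset.add_cons]

theorem pvExc_pos_of_mem (M : Multiset ℤ) {t x : ℤ} (hx : x ∈ M) (hgt : t < x) :
    0 < pvExc M t := by
  have h1 : (x - t) ∈ (M.filter (fun f => t < f)).map (fun f => f - t) := by
    simp only [Multiset.mem_map, Multiset.mem_filter]
    exact ⟨x, ⟨hx, hgt⟩, rfl⟩
  have h2 : ∀ y ∈ (M.filter (fun f => t < f)).map (fun f => f - t), 0 ≤ y := by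
    intro y hy
    simp only [Multiset.mem_map, Multiset.mem_filter] at hy
    obtain ⟨f, ⟨_, hf⟩, rfl⟩ := hy
    omega
  have := Multiset.single_le_sum h2 _ h1
  unfold pvExc
  omega

theorem pvFilterGe_eq_replicate (M : Multiset ℤ) {t : ℤ} (hexc : pvExc M t = 0) :
    M.filter (fun f => t ≤ f) = Multiset.replicate (pvCntGe M t).toNat t := by
  rw [Multiset.eq_replicate]
  constructor
  · simp [pvCntGe]
  · intro b hb
    rw [Multiset.mem_filter] at hb
    rcases eq_or_lt_of_le hb.2 with h | h
    · omega
    · have := pvExc_pos_of_mem M hb.1 h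
      omega

theorem pvL_zero (M : Multiset ℤ) (h0 : ∀ x ∈ M, 0 ≤ x) : pvL M 0 = M := by
  have hle := pvT_le M h0 (le_refl 0)
  have hnn := pvExc_nonneg M (pvT M 0)
  have hexc : pvExc M (pvT M 0) = 0 := by omega
  unfold pvL
  rw [hexc]
  rw [show (0 - 0 : ℤ).toNat = 0 by omega]
  rw [show (pvCntGe M (pvT M 0) - (0 - 0) : ℤ) = pvCntGe M (pvT M 0) by omega]
  rw [Multiset.replicate_zero, add_zero, ← pvFilterGe_eq_replicate M hexc]
  exact pvFilter_split M (pvT M 0)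

theorem pvL_sum (M : Multiset ℤ) (h0 : ∀ x ∈ M, 0 ≤ x) :
    pvL M M.sum = Multiset.replicate M.card 0 := by
  have hsum : 0 ≤ M.sum := Multiset.sum_nonneg h0
  have ht : (0 : ℤ) = pvT M M.sum := by
    apply pvT_unique M h0 hsum (le_refl 0) _ (Or.inl rfl)
    rw [pvExc_zero M h0]
  unfold pvL
  rw [← ht, pvExc_zero M h0]
  rw [show (M.sum - M.sum : ℤ).toNat = 0 by omega]
  rw [Multiset.replicate_zero, add_zero]
  have h1 : M.filter (fun f : ℤ => f < 0) = 0 := by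
    rw [Multiset.filter_eq_nil]
    intro a ha
    have := h0 a ha
    omega
  have h2 : M.filter (fun f : ℤ => (0:ℤ) ≤ f) = M := by
    rw [Multiset.filter_eq_self]
    exact h0
  rw [h1, zero_add]
  have h3 : (pvCntGe M 0 - (M.sum - M.sum)).toNat = M.card := by
    simp [pvCntGe, h2]
  rw [h3]

theorem pvL_mem_le (M : Multiset ℤ) {k : ℤ} : ∀ y ∈ pvL M k, y ≤ pvT M k := by
  intro y hy
  unfold pvL at hy
  rw [Multiset.mem_add, Multiset.mem_add] at hy
  rcases hy with (hy | hy) | hy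
  · rw [Multiset.mem_filter] at hy; omega
  · rw [Multiset.eq_of_mem_replicate hy]
  · rw [Multiset.eq_of_mem_replicate hy]; omega

theorem pvL_mem_top (M : Multiset ℤ) {k : ℤ} (h0 : ∀ x ∈ M, 0 ≤ x) (hk : 0 ≤ k)
    (hks : k < M.sum) : pvT M k ∈ pvL M k := by
  have hr := pvR_bounds M h0 hk hks
  unfold pvL
  rw [Multiset.mem_add, Multiset.mem_add]
  left; right
  rw [Multiset.mem_replicate]
  constructor
  · omega
  · rfl

-- counting elements ≥ t - 1 versus ≥ t
theorem pvCntGe_pred (M : Multiset ℤ) (t : ℤ) :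
    pvCntGe M (t - 1) = pvCntGe M t + ((M.filter (fun f => f = t - 1)).card : ℤ) := by
  unfold pvCntGe
  have h : M.filter (fun f => t - 1 ≤ f) = M.filter (fun f => f = t - 1) + M.filter (fun f => t ≤ f) := by
    induction M using Multiset.induction_on with
    | empty => simp
    | cons a M ih =>
      rw [Multiset.filter_cons, Multiset.filter_cons, Multiset.filter_cons, ih]
      split_ifs <;> try omega
      all_goals simp [Multiset.cons_add, Multiset.add_cons]
  rw [h]
  simp
  omega

-- one greedy decrement of the maximum advances the closed form by one step
theorem pvL_step (M : Multiset ℤ) {k : ℤ} (h0 : ∀ x ∈ M, 0 ≤ x) (hk : 0 ≤ k)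
    (hks : k < M.sum) :
    (pvT M k - 1) ::ₘ (pvL M k).erase (pvT M k) = pvL M (k + 1) := by
  set t := pvT M k with hTdef
  have hr := pvR_bounds M h0 hk hks
  have htpos := pvT_pos M h0 hk hks
  have hle := pvT_le M h0 hk
  have hpred := pvExc_pred M t
  set r := k - pvExc M t with hrdef
  set m := pvCntGe M t with hmdef
  have herase : (pvL M k).erase t
      = M.filter (fun f => f < t) + Multiset.replicate (m - r - 1).toNat t
        + Multiset.replicate r.toNat (t - 1) := by
    unfold pvL
    rw [← hTdef, ← hrdef, ← hmdef]
    have hmr : (m - r).toNat = (m - r - 1).toNat + 1 := by omega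
    rw [hmr, Multiset.replicate_succ]
    rw [Multiset.erase_add_left_pos _ (by
      rw [Multiset.mem_add]
      right
      exact Multiset.mem_cons_self _ _)]
    rw [Multiset.erase_add_right_pos _ (Multiset.mem_cons_self _ _)]
    rw [Multiset.erase_cons_head]
  rw [herase]
  by_cases hcase : r + 1 < m
  · -- threshold unchanged
    have ht' : t = pvT M (k + 1) := by
      apply pvT_unique M h0 (by omega) (by omega) (by omega)
      right
      omega
    unfold pvL
    rw [← ht']
    rw [show (pvCntGe M t - (k + 1 - pvExc M t)) = m - r - 1 by omega]
    rw [show (k + 1 - pvExc M t) = r + 1 by omega]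
    rw [show (r + 1).toNat = r.toNat + 1 by omega]
    rw [Multiset.replicate_succ]
    simp [Multiset.add_cons]
  · -- r + 1 = m: threshold drops to t - 1
    have hm : r + 1 = m := by omega
    have hcnt := pvCntGe_pred M t
    have ht' : t - 1 = pvT M (k + 1) := by
      apply pvT_unique M h0 (by omega) (by omega) (by omega)
      rcases eq_or_lt_of_le htpos with h1 | h1
      · left; omega
      · right
        have hcard : (0:ℤ) ≤ ((M.filter (fun f => f = t - 1)).card : ℤ) := by positivity
        have h2 : pvExc M (t - 1 - 1) = pvExc M (t - 1) + pvCntGe M (t - 1) := pvExc_pred M (t - 1)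
        omega
    unfold pvL
    rw [← ht']
    rw [show (k + 1 - pvExc M (t - 1)) = 0 by omega]
    rw [show ((pvCntGe M (t-1)) - (0:ℤ)) = pvCntGe M (t - 1) by omega]
    rw [show ((0:ℤ)).toNat = 0 by omega, Multiset.replicate_zero, add_zero]
    rw [show (m - r - 1).toNat = 0 by omega, Multiset.replicate_zero, add_zero]
    rw [pvFilter_lt_split M t]
    have hfe : M.filter (fun f => f = t - 1) = Multiset.replicate (M.count (t-1)) (t - 1) :=
      Multiset.filter_eq' M (t - 1)
    have hcnt2 : (pvCntGe M (t - 1)).toNat = (r.toNat + 1) + M.count (t - 1) := by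
      have : ((M.filter (fun f => f = t - 1)).card : ℤ) = (M.count (t-1) : ℤ) := by
        rw [hfe]; simp
      omega
    rw [hcnt2, hfe]
    rw [Multiset.replicate_add, Multiset.replicate_succ]
    simp only [Multiset.add_cons, Multiset.cons_add]
    congr 1
    abel

theorem pvSumsqA_coe (l : List ℤ) : pvSumsqA l = pvMsq (l : Multiset ℤ) := by
  simp [pvSumsqA, pvMsq, Multiset.map_coe, Multiset.sum_coe, pow_two]

theorem pvMsq_zeros (c : ℕ) : pvMsq (Multiset.replicate c 0) = 0 := by
  simp [pvMsq]

-- A's loop, started on any list realising the state pvL M k, lands on the closed form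
theorem pvMain (M : Multiset ℤ) (h0 : ∀ x ∈ M, 0 ≤ x) :
    ∀ (n : ℕ) (k : ℤ) (l : List ℤ), 0 ≤ k → k ≤ M.sum → (l : Multiset ℤ) = pvL M k →
      pvLoopA n l = pvMsq (pvL M (min (k + n) M.sum)) := by
  intro n
  induction n with
  | zero =>
    intro k l hk hks hl
    rw [show ((0:ℕ):ℤ) = 0 from rfl, add_zero, min_eq_left hks]
    show pvSumsqA l = _
    rw [pvSumsqA_coe, hl]
  | succ n ih =>
    intro k l hk hks hl
    have hmin : min (k + ((n+1 : ℕ) : ℤ)) M.sum = min ((k+1) + (n : ℕ)) M.sum := by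
      congr 1; push_cast; ring
    rcases eq_or_lt_of_le hks with rfl | hlt
    · -- k = M.sum : the state is all zeros, A hits `if v == 0: return 0`
      have hzeros : (l : Multiset ℤ) = Multiset.replicate M.card 0 := by
        rw [hl, pvL_sum M h0]
      have hrhs : min (M.sum + ((n+1:ℕ):ℤ)) M.sum = M.sum := by
        have : (0:ℤ) ≤ ((n+1:ℕ):ℤ) := by positivity
        omega
      rw [hrhs, pvL_sum M h0, pvMsq_zeros]
      show pvLoopA (n+1) l = 0
      cases hmax : PySem.List.max? l (fun y => y) with
      | none => simp [pvLoopA, hmax]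
      | some mx =>
        have hmem := PySem.List.max?_mem hmax
        have hmx0 : mx = 0 := by
          have hmem' : mx ∈ (l : Multiset ℤ) := hmem
          rw [hzeros] at hmem'
          exact Multiset.eq_of_mem_replicate hmem'
        subst hmx0
        have hsome : (PySem.List.index? l (0:ℤ)).isSome := by
          rw [PySem.List.index?_isSome_iff]; exact hmem
        obtain ⟨i, hi⟩ := Option.isSome_iff_exists.mp hsome
        obtain ⟨hilen, hget, -⟩ := PySem.List.getElem_of_index?_eq_some hi
        simp only [pvLoopA, hmax, hi]
        rw [PySem.List.pyGetD_natCast, List.getD_eq_getElem l 0 hilen, hget]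
        simp
    · -- k < M.sum : decrement the (first) maximum
      set t := pvT M k with hTdef
      have htpos := pvT_pos M h0 hk hlt
      have htop : t ∈ (l : Multiset ℤ) := by rw [hl]; exact pvL_mem_top M h0 hk hlt
      have htop' : t ∈ l := htop
      cases hmax : PySem.List.max? l (fun y => y) with
      | none =>
        rw [PySem.List.max?_eq_none_iff] at hmax
        subst hmax
        simp at htop'
      | some mx =>
        have hmxt : mx = t := by
          have h1 : t ≤ mx := PySem.List.max?_isMax hmax t htop'
          have h2 : mx ≤ t := by
            apply pvL_mem_le M (k := k)
            rw [← hl]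
            exact PySem.List.max?_mem hmax
          omega
        subst hmxt
        have hsome : (PySem.List.index? l t).isSome := by
          rw [PySem.List.index?_isSome_iff]; exact htop'
        obtain ⟨i, hi⟩ := Option.isSome_iff_exists.mp hsome
        obtain ⟨pre, suf, hdecomp, hlen, -⟩ := (PySem.List.index?_eq_some_iff l t i).mp hi
        obtain ⟨hilen, hget, -⟩ := PySem.List.getElem_of_index?_eq_some hi
        simp only [pvLoopA, hmax, hi]
        rw [PySem.List.pyGetD_natCast, List.getD_eq_getElem l 0 hilen, hget]
        rw [if_neg (by omega)]
        rw [PySem.List.pySetD_natCast]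
        have hset : l.set i (t - 1) = pre ++ (t-1) :: suf := by
          rw [hdecomp, ← hlen, List.set_append_right _ _ (by omega)]
          simp
        have hnew : ((l.set i (t-1) : List ℤ) : Multiset ℤ) = pvL M (k + 1) := by
          rw [hset, ← pvL_step M h0 hk hlt, ← hTdef, ← hl, hdecomp]
          have h1 : ((pre ++ (t-1) :: suf : List ℤ) : Multiset ℤ) = (t-1) ::ₘ (↑pre + ↑suf) := by
            simp
          have h2 : ((pre ++ t :: suf : List ℤ) : Multiset ℤ) = t ::ₘ (↑pre + ↑suf) := by
            simp
          rw [h1, h2, Multiset.erase_cons_head]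
        rw [ih (k+1) _ (by omega) (by omega) hnew, hmin]

theorem pvExcessB_coe (l : List ℤ) (t : ℤ) : pvExc (l : Multiset ℤ) t = pvExcessB l t := by
  simp [pvExc, pvExcessB, Multiset.filter_coe, Multiset.map_coe, Multiset.sum_coe]

theorem pvCntGe_coe (l : List ℤ) (t : ℤ) :
    pvCntGe (l : Multiset ℤ) t = ((l.filter (fun f => t ≤ f)).length : ℤ) := by
  simp [pvCntGe, Multiset.filter_coe]

-- B's binary-search loop computes the least levelling threshold pvT
theorem pvBsearch_aux (l : List ℤ) (K : ℤ) (h0 : ∀ x ∈ (l : Multiset ℤ), 0 ≤ x) (hK : 0 ≤ K) :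
    ∀ (N : ℕ) (lo hi : ℤ), (hi - lo).toNat ≤ N → 0 ≤ lo → lo ≤ hi → pvExcessB l hi ≤ K →
      (lo = 0 ∨ K < pvExcessB l (lo - 1)) →
      pvBsearchB l K lo hi = pvT (l : Multiset ℤ) K := by
  intro N
  induction N with
  | zero =>
    intro lo hi hN hlo hlohi hhi hmin
    have heq : lo = hi := by omega
    rw [pvBsearchB, dif_neg (by omega)]
    apply pvT_unique _ h0 hK hlo
    · rw [pvExcessB_coe, heq]; exact hhi
    · rcases hmin with h | h
      · exact Or.inl h
      · exact Or.inr (by rw [pvExcessB_coe]; exact h)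
  | succ N ih =>
    intro lo hi hN hlo hlohi hhi hmin
    rw [pvBsearchB]
    split
    case isTrue h =>
      have hmid := PySem.Int.floordiv_two_mid_bounds (le_of_lt h)
      have hlt : PySem.Int.floordiv (lo + hi) 2 < hi := by
        rw [PySem.Int.floordiv_lt_iff_lt_mul (by omega)]; omega
      set mid := PySem.Int.floordiv (lo + hi) 2 with hmiddef
      dsimp only
      split
      case isTrue htest => exact ih lo mid (by omega) hlo (by omega) htest hmin
      case isFalse htest =>
        refine ih (mid + 1) hi (by omega) (by omega) (by omega) hhi ?_
        right
        rw [show mid + 1 - 1 = mid by omega]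
        omega
    case isFalse h =>
      apply pvT_unique _ h0 hK hlo
      · rw [pvExcessB_coe, show lo = hi by omega]; exact hhi
      · rcases hmin with hx | hx
        · exact Or.inl hx
        · exact Or.inr (by rw [pvExcessB_coe]; exact hx)

-- sum of squares of the levelled distribution, in B's closed form
theorem pvMsq_L (M : Multiset ℤ) {k : ℤ} (h0 : ∀ x ∈ M, 0 ≤ x) (hk : 0 ≤ k)
    (hks : k < M.sum) :
    pvMsq (pvL M k)
      = ((M.filter (fun f => f < pvT M k)).map (fun f => f * f)).sum
        + (pvCntGe M (pvT M k) - (k - pvExc M (pvT M k))) * pvT M k * pvT M k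
        + (k - pvExc M (pvT M k)) * (pvT M k - 1) * (pvT M k - 1) := by
  have hr := pvR_bounds M h0 hk hks
  unfold pvL pvMsq
  rw [Multiset.map_add, Multiset.map_add, Multiset.sum_add, Multiset.sum_add]
  rw [Multiset.map_replicate, Multiset.map_replicate, Multiset.sum_replicate, Multiset.sum_replicate]
  rw [nsmul_eq_mul, nsmul_eq_mul]
  rw [Int.toNat_of_nonneg (by omega), Int.toNat_of_nonneg (by omega)]
  ring

-- the shared frequency list, described through the counter
theorem pvFreqs_eq (S : String) :
    pvFreqsA S = (PySem.Set.ofList S.toList).map (fun c => ((S.toList.count c : ℕ) : ℤ)) := by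
  unfold pvFreqsA
  rw [PySem.Dict.foldl_insert_getD_add_one_eq_counter]
  show (PySem.Dict.counter S.toList).items.map Prod.snd = _
  rw [PySem.Dict.items_counter, List.map_map]
  rfl

theorem pvFreqs_pos (S : String) : ∀ x ∈ pvFreqsA S, 1 ≤ x := by
  rw [pvFreqs_eq]
  intro x hx
  rw [List.mem_map] at hx
  obtain ⟨c, hc, rfl⟩ := hx
  have hmem : c ∈ S.toList := (PySem.Set.mem_ofList _ _).mp hc
  have := List.count_pos_iff.mpr hmem
  omega

theorem pvFreqs_ne_nil (S : String) (hS : S ≠ "") : pvFreqsA S ≠ [] := by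
  rw [pvFreqs_eq]
  intro hnil
  rw [List.map_eq_nil_iff] at hnil
  have hc : S.toList ≠ [] := fun h => hS (String.toList_eq_nil_iff.mp h)
  cases hh : S.toList with
  | nil => exact hc hh
  | cons c cs =>
    have : c ∈ PySem.Set.ofList S.toList := by
      rw [PySem.Set.mem_ofList, hh]
      exact List.mem_cons_self
    rw [hnil] at this
    simp at this

-- ===== VERDICT (by name: the statement is the Claim_ definition above) =====
theorem min_value_after_removal_spec : Claim_equal_min_value_after_removal := by
  intro S K _ hpre
  unfold Spec_min_value_after_removal
  simp only [min_value_after_removal, min_value_after_removal_alt]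
  have hBA : pvFreqsB S = pvFreqsA S := rfl
  rw [hBA]
  set l := pvFreqsA S with hldef
  have hpos : ∀ x ∈ l, 1 ≤ x := pvFreqs_pos S
  have h0 : ∀ x ∈ (l : Multiset ℤ), 0 ≤ x := by
    intro x hx
    have := hpos x hx
    omega
  have hsum_coe : (l : Multiset ℤ).sum = l.sum := Multiset.sum_coe l
  by_cases hS : S = ""
  · -- empty string: Pre_ forces K ≤ 0, both sides are 0 / the empty sum
    have hK : K ≤ 0 := hpre hS
    have hl : l = [] := by rw [hldef, hS]; rfl
    rw [hl, show K.toNat = 0 from by omega]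
    show pvSumsqA [] = _
    simp [pvSumsqA]
    intros
    omega
  · have hne : l ≠ [] := pvFreqs_ne_nil S hS
    have hsum_pos : 0 < l.sum := by
      cases hl2 : l with
      | nil => exact absurd hl2 hne
      | cons x xs =>
        have hx := hpos x (by rw [hl2]; exact List.mem_cons_self)
        have hxs : 0 ≤ xs.sum := List.sum_nonneg (by
          intro y hy
          have := hpos y (by rw [hl2]; exact List.mem_cons_of_mem _ hy)
          omega)
        rw [List.sum_cons]
        omega
    by_cases h1 : l.sum ≤ K
    · rw [if_pos h1]
      have hmn := pvMain (l : Multiset ℤ) h0 K.toNat 0 l (le_refl 0) (by omega)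
        (by rw [pvL_zero _ h0])
      rw [hmn]
      have harg : min ((0 : ℤ) + (K.toNat : ℤ)) ((l : Multiset ℤ)).sum = ((l : Multiset ℤ)).sum := by
        omega
      rw [harg, pvL_sum _ h0, pvMsq_zeros]
    · rw [if_neg h1]
      by_cases h2 : K ≤ 0
      · rw [if_pos h2]
        rw [show K.toNat = 0 from by omega]
        show pvSumsqA l = _
        simp [pvSumsqA, pow_two]
      · rw [if_neg h2]
        -- 0 < K < l.sum
        have hKpos : 0 < K := by omega
        have hKlt : K < ((l : Multiset ℤ)).sum := by omega
        cases hmax : PySem.List.max? l (fun y => y) with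
        | none =>
          rw [PySem.List.max?_eq_none_iff] at hmax
          exact absurd hmax hne
        | some mx =>
          have hmx_mem := PySem.List.max?_mem hmax
          have hmx_max := PySem.List.max?_isMax hmax
          have hmx_pos : 1 ≤ mx := hpos mx hmx_mem
          have hbs := pvBsearch_aux l K h0 (by omega) (mx - 0).toNat 0 mx (by omega)
            (le_refl 0) (by omega)
            (by
              rw [← pvExcessB_coe]
              have := pvExc_eq_zero_of_le (l : Multiset ℤ) (t := mx)
                (fun x hx => hmx_max x hx)
              omega)
            (Or.inl rfl)
          simp only [Option.getD_some, hbs]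
          have hmn := pvMain (l : Multiset ℤ) h0 K.toNat 0 l (le_refl 0) (by omega)
            (by rw [pvL_zero _ h0])
          rw [hmn]
          have harg : min ((0 : ℤ) + (K.toNat : ℤ)) ((l : Multiset ℤ)).sum = K := by
            omega
          rw [harg]
          rw [pvMsq_L _ h0 (by omega) hKlt]
          rw [pvExcessB_coe, pvCntGe_coe]
          have hsq : ((((l : Multiset ℤ)).filter (fun f => f < pvT (l : Multiset ℤ) K)).map (fun f => f * f)).sum
              = ((l.filter (fun f => f < pvT (l : Multiset ℤ) K)).map (fun f => f * f)).sum := by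
            simp [Multiset.filter_coe, Multiset.map_coe, Multiset.sum_coe]
          rw [hsq]
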